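-- pv_equiv track=rewrite | github.com/oriole0105/AI_Coding | py/csv_formatter.py | convert_to_format2
-- ===== SOURCE A (Python) =====
-- def convert_to_format2(data):
--     """
--     轉換為格式2: type, 日期, 數值
--     按type分組排列
--     Args:
--         data: 輸入資料列表
--     Returns:
--         list: 轉換後的資料列表
--     """
--     result = []
--
--     # 先收集所有plan的資料
--     for row in data:
--         date, plan, _, _ = row
--         result.append(['plan', date, plan])
--
--     # 再收集所有create的資料
--     for row in data:
--         date, _, create, _ = row
--         result.append(['create', date, create])
--
--     # 最後收集所有pass的資料
--     for row in data:
--         date, _, _, pass_val = row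
--         result.append(['pass', date, pass_val])
--
--     return result
-- ===== SOURCE B (Python) =====
-- def convert_to_format2(data):
--     plans = []
--     creates = []
--     passes = []
--     for row in data:
--         date, plan, create, pass_val = row
--         plans.append(['plan', date, plan])
--         creates.append(['create', date, create])
--         passes.append(['pass', date, pass_val])
--     return plans + creates + passes
-- ===== Notes on version B (the rewrite author's own statement) =====
-- stated objective: alternative
-- what changed: B traverses the data once, maintaining three accumulator lists (plan/create/pass records) and concatenating them at the end, instead of A's three separate full scans over the data.
import Mathlib
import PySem

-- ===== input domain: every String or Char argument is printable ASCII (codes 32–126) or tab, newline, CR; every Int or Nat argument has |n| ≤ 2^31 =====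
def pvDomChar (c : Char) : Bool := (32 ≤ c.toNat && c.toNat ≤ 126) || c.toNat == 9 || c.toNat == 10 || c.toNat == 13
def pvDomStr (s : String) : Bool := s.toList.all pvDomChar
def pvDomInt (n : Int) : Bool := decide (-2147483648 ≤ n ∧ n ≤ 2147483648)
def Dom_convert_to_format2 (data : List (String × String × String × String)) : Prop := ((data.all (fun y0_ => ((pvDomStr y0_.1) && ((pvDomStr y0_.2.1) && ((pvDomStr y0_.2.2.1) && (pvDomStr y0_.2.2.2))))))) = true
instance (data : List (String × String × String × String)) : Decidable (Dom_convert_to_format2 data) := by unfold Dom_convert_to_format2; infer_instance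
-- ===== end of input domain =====

-- B replaces A's three separate scans over the data with one pass keeping three accumulators, concatenated at the end (alternative decomposition, same cost).
-- ===== PORT A =====
def convert_to_format2 (data : List (String × String × String × String)) : List (List String) :=
  let result := []
  let result := data.foldl (fun result row =>
    let date := row.1; let plan := row.2.1
    result ++ [["plan", date, plan]]) result
  let result := data.foldl (fun result row =>
    let date := row.1; let create := row.2.2.1
    result ++ [["create", date, create]]) result
  let result := data.foldl (fun result row =>
    let date := row.1; let pass_val := row.2.2.2
    result ++ [["pass", date, pass_val]]) result
  result

-- ===== PORT B =====
def convert_to_format2_alt (data : List (String × String × String × String)) : List (List String) :=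
  let acc := data.foldl (fun (acc : List (List String) × List (List String) × List (List String)) row =>
    let (date, plan, create, pass_val) := row
    (acc.1 ++ [["plan", date, plan]],
     acc.2.1 ++ [["create", date, create]],
     acc.2.2 ++ [["pass", date, pass_val]])) ([], [], [])
  acc.1 ++ acc.2.1 ++ acc.2.2

-- ===== PRECONDITION & SPEC =====
def Spec_convert_to_format2 (data : List (String × String × String × String)) (out : List (List String)) : Prop := out = convert_to_format2_alt data
instance (data : List (String × String × String × String)) (out : List (List String)) : Decidable (Spec_convert_to_format2 data out) := by unfold Spec_convert_to_format2; infer_instance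

-- ===== CLAIM (what is proved, stated in full; the proofs are below) =====
def Claim_equal_convert_to_format2 : Prop := ∀ (data : List (String × String × String × String)), Dom_convert_to_format2 data → Spec_convert_to_format2 data (convert_to_format2 data)

-- ===== LEMMAS AND PROOFS =====

-- ===== VERDICT (by name: the statement is the Claim_ definition above) =====
lemma alt_foldl_acc (data : List (String × String × String × String))
    (p c q : List (List String)) :
    data.foldl (fun (acc : List (List String) × List (List String) × List (List String)) row =>
      (acc.1 ++ [["plan", row.1, row.2.1]],
       acc.2.1 ++ [["create", row.1, row.2.2.1]],
       acc.2.2 ++ [["pass", row.1, row.2.2.2]])) (p, c, q)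
    = (p ++ data.map (fun row => ["plan", row.1, row.2.1]),
       c ++ data.map (fun row => ["create", row.1, row.2.2.1]),
       q ++ data.map (fun row => ["pass", row.1, row.2.2.2])) := by
  induction data generalizing p c q with
  | nil => simp
  | cons hd tl ih => simp [List.foldl, ih]

theorem convert_to_format2_spec : Claim_equal_convert_to_format2 := by
  intro data _
  unfold Spec_convert_to_format2 convert_to_format2 convert_to_format2_alt
  rw [alt_foldl_acc]
  simp only [PySem.List.foldl_append_singleton_eq_map]
  simp
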